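-- pv_equiv track=rewrite | github.com/MohammadForouhesh/persian-relatio | src/syntactic_role_labeling.py | mock_tags
-- ===== SOURCE A (Python) =====
-- from typing import Dict, List, Optional, Tuple, Union, Generator, Any
--
-- def mock_tags(rel_tagged: List[Tuple[str, str]]) -> Generator[str, None, None]:
--     for item in rel_tagged:
--         if item[0] == '':       yield 'O'
--         else:
--             yield f'B-{item[0]}'
--             for _ in item[1].split()[1:]:
--                 if item[0] == '':       yield 'O'
--                 elif item[0] != 'V':    yield f'I-{item[0]}'
--                 else:                   yield f'B-{item[0]}'
-- ===== SOURCE B (Python) =====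
-- def mock_tags(rel_tagged):
--     def item_tags(rel, text):
--         if rel == '':
--             return ['O']
--         n = max(1, len(text.split()))
--         if rel == 'V':
--             return ['B-V'] * n
--         return ['B-' + rel] + ['I-' + rel] * (n - 1)
--     for rel, text in rel_tagged:
--         yield from item_tags(rel, text)
-- ===== Notes on version B (the rewrite author's own statement) =====
-- stated objective: simpler
-- what changed: B computes each item's tag block in closed form from the word count (list repetition: ['O'], ['B-V']*n, or ['B-'+r]+['I-'+r]*(n-1)) and yields it at once, instead of A's inner per-token loop that re-tests the branches on every word.
import Mathlib
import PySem

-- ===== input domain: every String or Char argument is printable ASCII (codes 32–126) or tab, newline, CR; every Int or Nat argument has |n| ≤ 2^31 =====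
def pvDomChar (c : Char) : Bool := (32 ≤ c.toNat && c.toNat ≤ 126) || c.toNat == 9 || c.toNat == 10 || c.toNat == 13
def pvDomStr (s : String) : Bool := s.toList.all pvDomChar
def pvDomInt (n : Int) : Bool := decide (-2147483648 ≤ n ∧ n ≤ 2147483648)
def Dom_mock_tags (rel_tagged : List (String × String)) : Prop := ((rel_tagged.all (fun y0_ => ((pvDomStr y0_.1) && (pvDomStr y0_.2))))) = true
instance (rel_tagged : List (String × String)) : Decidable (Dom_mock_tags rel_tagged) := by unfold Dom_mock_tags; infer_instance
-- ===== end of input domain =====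

-- B builds each item's tag block in closed form from the word count instead of A's inner per-token loop; objective: simpler.

-- ===== PORT A =====
-- literal transliteration of A: outer loop yields, inner loop over item[1].split()[1:] re-tests the branches
def mock_tags (rel_tagged : List (String × String)) : List String :=
  rel_tagged.flatMap (fun item =>
    if item.1 = "" then ["O"]
    else
      ("B-" ++ item.1) ::
        (PySem.List.slice (PySem.Str.split₀ item.2) (some (1 : Int)) none).map (fun _ =>
          if item.1 = "" then "O"
          else if item.1 ≠ "V" then "I-" ++ item.1
          else "B-" ++ item.1))

-- ===== PORT B =====
def mock_tags_itemTags (rel text : String) : List String :=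
  if rel = "" then ["O"]
  else
    let n := max 1 (PySem.Str.split₀ text).length
    if rel = "V" then List.replicate n "B-V"
    else ("B-" ++ rel) :: List.replicate (n - 1) ("I-" ++ rel)

def mock_tags_alt (rel_tagged : List (String × String)) : List String :=
  rel_tagged.flatMap (fun item => mock_tags_itemTags item.1 item.2)

-- ===== PRECONDITION & SPEC =====
def Spec_mock_tags (rel_tagged : List (String × String)) (out : List String) : Prop := out = mock_tags_alt rel_tagged
instance (rel_tagged : List (String × String)) (out : List String) : Decidable (Spec_mock_tags rel_tagged out) := by unfold Spec_mock_tags; infer_instance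

-- ===== CLAIM (what is proved, stated in full; the proofs are below) =====
def Claim_equal_mock_tags : Prop := ∀ (rel_tagged : List (String × String)), Dom_mock_tags rel_tagged → Spec_mock_tags rel_tagged (mock_tags rel_tagged)

-- ===== LEMMAS AND PROOFS =====

theorem map_const_replicate {α β : Type} (l : List α) (c : β) :
    l.map (fun _ => c) = List.replicate l.length c := by
  induction l with
  | nil => rfl
  | cons x xs ih => simp [List.replicate, ih]

theorem mock_tags_item_eq (rel text : String) :
    (if rel = "" then ["O"]
     else
       ("B-" ++ rel) ::
         (PySem.List.slice (PySem.Str.split₀ text) (some (1 : Int)) none).map (fun _ =>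
           if rel = "" then "O"
           else if rel ≠ "V" then "I-" ++ rel
           else "B-" ++ rel)) = mock_tags_itemTags rel text := by
  unfold mock_tags_itemTags
  by_cases h : rel = ""
  · simp [h]
  · simp only [h, ite_false]
    rw [show ((1 : Int) = ((1 : Nat) : Int)) from rfl, PySem.List.slice_from_natCast,
        map_const_replicate]
    by_cases hv : rel = "V"
    · subst hv
      simp only [ne_eq, not_true_eq_false, ite_false, ite_true]
      cases hs : PySem.Str.split₀ text with
      | nil => simp
      | cons w ws =>
          rw [Nat.max_eq_right (by simp)]
          simp [List.replicate]
    · simp only [ne_eq, hv, not_false_eq_true, ite_true, ite_false]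
      cases hs : PySem.Str.split₀ text with
      | nil => simp
      | cons w ws =>
          rw [Nat.max_eq_right (by simp)]
          simp

-- ===== VERDICT (by name: the statement is the Claim_ definition above) =====
theorem mock_tags_spec : Claim_equal_mock_tags := by
  intro rel_tagged _
  unfold Spec_mock_tags mock_tags mock_tags_alt
  have hf : (fun item : String × String =>
      if item.1 = "" then ["O"]
      else
        ("B-" ++ item.1) ::
          (PySem.List.slice (PySem.Str.split₀ item.2) (some (1 : Int)) none).map (fun _ =>
            if item.1 = "" then "O"
            else if item.1 ≠ "V" then "I-" ++ item.1
            else "B-" ++ item.1)) =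
      (fun item : String × String => mock_tags_itemTags item.1 item.2) := by
    funext item
    exact mock_tags_item_eq item.1 item.2
  rw [hf]
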